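-- pv_equiv track=rewrite | github.com/DivineJK/MyPythonLibrary | MathLibrary/FloorCeilSum.py | calculateFloorCeilSum
-- ===== SOURCE A (Python) =====
-- def calculateFloorCeilSum(n):
--     # sum(sum(floor(a / b) + ceil(a / b) for b in range(1, n+1)) for a in range(1, n+1))
--     res = n * n
--     for b in range(1, n+1):
--         res += n // b
--     for b in range(1, n+1):
--         t = n // b
--         res += b * t * (t - 1)
--         res += 2 * t * (n % b)
--     return res
-- ===== SOURCE B (Python) =====
-- def calculateFloorCeilSum(n):
--     # O(sqrt(n)) divisor-block summation: n//b is constant on blocks [b, n//(n//b)],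
--     # and each per-b term is linear in b there, so each block sums in O(1).
--     res = n * n
--     b = 1
--     while b <= n:
--         t = n // b
--         r = n // t
--         cnt = r - b + 1
--         sb = (b + r) * cnt // 2
--         res += cnt * (t + 2 * t * n) - t * (t + 1) * sb
--         b = r + 1
--     return res
-- ===== Notes on version B (the rewrite author's own statement) =====
-- stated objective: faster
-- what changed: Replaces A's two O(n) loops over every b in 1..n by a divisor-block loop: n//b is constant on O(sqrt(n)) blocks [b, n//(n//b)], the per-b term is linear in b on each block, so each block is summed in O(1) with an arithmetic-series formula.
import Mathlib
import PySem

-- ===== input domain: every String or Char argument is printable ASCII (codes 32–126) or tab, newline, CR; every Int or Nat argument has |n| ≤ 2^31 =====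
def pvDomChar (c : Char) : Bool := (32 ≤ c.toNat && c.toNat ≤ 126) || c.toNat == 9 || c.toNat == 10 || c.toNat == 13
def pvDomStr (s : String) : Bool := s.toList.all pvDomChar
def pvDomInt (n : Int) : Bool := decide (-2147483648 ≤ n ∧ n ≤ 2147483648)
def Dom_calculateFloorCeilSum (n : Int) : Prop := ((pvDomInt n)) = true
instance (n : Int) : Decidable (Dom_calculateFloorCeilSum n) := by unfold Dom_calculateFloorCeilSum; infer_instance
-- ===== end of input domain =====

-- B replaces A's two O(n) loops by an O(√n) divisor-block loop (n//b is constant on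
-- each block [b, n//(n//b)], and each block is summed in closed form).

-- ===== PORT A =====
def calculateFloorCeilSum (n : Int) : Int :=
  let res := n * n
  let res := (PySem.List.pyRange 1 (n + 1) 1).foldl
    (fun res b => res + PySem.Int.floordiv n b) res
  let res := (PySem.List.pyRange 1 (n + 1) 1).foldl
    (fun res b =>
      let t := PySem.Int.floordiv n b
      let res := res + b * t * (t - 1)
      res + 2 * t * PySem.Int.mod n b) res
  res

-- ===== PORT B =====
-- 'while b <= n' loop of Source B; fuel n.toNat bounds the iteration count, which is
-- sufficient because b (starting at 1) strictly increases on every pass.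
def fcsLoop (n : Int) : Nat → Int → Int → Int
  | 0, _, res => res
  | fuel + 1, b, res =>
    if b ≤ n then
      let t := PySem.Int.floordiv n b
      let r := PySem.Int.floordiv n t
      let cnt := r - b + 1
      let sb := PySem.Int.floordiv ((b + r) * cnt) 2
      fcsLoop n fuel (r + 1) (res + (cnt * (t + 2 * t * n) - t * (t + 1) * sb))
    else res

def calculateFloorCeilSum_alt (n : Int) : Int := fcsLoop n n.toNat 1 (n * n)

-- ===== PRECONDITION & SPEC =====
def Spec_calculateFloorCeilSum (n : Int) (out : Int) : Prop := out = calculateFloorCeilSum_alt n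
instance (n : Int) (out : Int) : Decidable (Spec_calculateFloorCeilSum n out) := by unfold Spec_calculateFloorCeilSum; infer_instance

-- ===== CLAIM (what is proved, stated in full; the proofs are below) =====
def Claim_equal_calculateFloorCeilSum : Prop := ∀ (n : Int), Dom_calculateFloorCeilSum n → Spec_calculateFloorCeilSum n (calculateFloorCeilSum n)

-- ===== LEMMAS AND PROOFS =====

-- sum of g over the integer interval [b, top]
def ISum (g : Int → Int) (b top : Int) : Int :=
  if b ≤ top then g b + ISum g (b + 1) top else 0
termination_by (top + 1 - b).toNat
decreasing_by omega

theorem ISum_nil (g : Int → Int) (b top : Int) (h : top < b) : ISum g b top = 0 := by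
  rw [ISum, if_neg (by omega)]

theorem ISum_cons (g : Int → Int) (b top : Int) (h : b ≤ top) :
    ISum g b top = g b + ISum g (b + 1) top := by
  rw [ISum, if_pos h]

theorem ISum_split (g : Int → Int) (b m top : Int) (h1 : b ≤ m + 1) (h2 : m ≤ top) :
    ISum g b top = ISum g b m + ISum g (m + 1) top := by
  by_cases hb : b ≤ m
  · rw [ISum_cons g b top (by omega), ISum_cons g b m hb,
      ISum_split g (b + 1) m top (by omega) h2]
    ring
  · have hbm : b = m + 1 := by omega
    rw [hbm, ISum_nil g (m + 1) m (by omega)]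
    simp
termination_by (m + 1 - b).toNat
decreasing_by omega

theorem ISum_congr (g h : Int → Int) (b top : Int)
    (he : ∀ j, b ≤ j → j ≤ top → g j = h j) :
    ISum g b top = ISum h b top := by
  by_cases hb : b ≤ top
  · rw [ISum_cons g b top hb, ISum_cons h b top hb, he b le_rfl hb,
      ISum_congr g h (b + 1) top (fun j h1 h2 => he j (by omega) h2)]
  · rw [ISum_nil g b top (by omega), ISum_nil h b top (by omega)]
termination_by (top + 1 - b).toNat
decreasing_by omega

theorem ISum_add (g h : Int → Int) (b top : Int) :
    ISum (fun j => g j + h j) b top = ISum g b top + ISum h b top := by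
  by_cases hb : b ≤ top
  · rw [ISum_cons _ b top hb, ISum_cons g b top hb, ISum_cons h b top hb,
      ISum_add g h (b + 1) top]
    ring
  · rw [ISum_nil _ b top (by omega), ISum_nil g b top (by omega),
      ISum_nil h b top (by omega)]
    ring
termination_by (top + 1 - b).toNat
decreasing_by omega

theorem ISum_gauss (b top : Int) (h : b ≤ top + 1) :
    2 * ISum (fun j => j) b top = (b + top) * (top + 1 - b) := by
  by_cases hb : b ≤ top
  · rw [ISum_cons _ b top hb]
    have ih := ISum_gauss (b + 1) top (by omega)
    linear_combination ih
  · rw [ISum_nil _ b top (by omega)]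
    have : b = top + 1 := by omega
    subst this; ring
termination_by (top + 1 - b).toNat
decreasing_by omega

theorem ISum_linear (c1 c2 b top : Int) (h : b ≤ top + 1) :
    ISum (fun j => c1 - c2 * j) b top
      = (top + 1 - b) * c1 - c2 * ISum (fun j => j) b top := by
  by_cases hb : b ≤ top
  · rw [ISum_cons _ b top hb, ISum_cons (fun j => j) b top hb,
      ISum_linear c1 c2 (b + 1) top (by omega)]
    ring
  · rw [ISum_nil _ b top (by omega), ISum_nil (fun j => j) b top (by omega)]
    have : b = top + 1 := by omega
    subst this; ring
termination_by (top + 1 - b).toNat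
decreasing_by omega

theorem foldl_pyRange_add (g : Int → Int) (a b top : Int) :
    (PySem.List.pyRange b (top + 1) 1).foldl (fun acc j => acc + g j) a
      = a + ISum g b top := by
  by_cases hb : b ≤ top
  · rw [PySem.List.pyRange_one_cons (by omega : b < top + 1), List.foldl_cons,
      foldl_pyRange_add g (a + g b) (b + 1) top, ISum_cons g b top hb]
    ring
  · rw [PySem.List.pyRange_one_eq_nil (by omega), List.foldl_nil,
      ISum_nil g b top (by omega)]
    ring
termination_by (top + 1 - b).toNat
decreasing_by omega

-- the per-b summand of A (both loops combined)
def gFC (n : Int) : Int → Int := fun j =>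
  PySem.Int.floordiv n j
    + (j * PySem.Int.floordiv n j * (PySem.Int.floordiv n j - 1)
        + 2 * PySem.Int.floordiv n j * PySem.Int.mod n j)

-- basic floordiv facts on the block [b, n // (n // b)]
theorem fdiv_facts (n b : Int) (hb : 0 < b) (hbn : b ≤ n) :
    1 ≤ PySem.Int.floordiv n b
      ∧ b ≤ PySem.Int.floordiv n (PySem.Int.floordiv n b)
      ∧ PySem.Int.floordiv n (PySem.Int.floordiv n b) ≤ n := by
  have ht : 1 ≤ PySem.Int.floordiv n b :=
    (PySem.Int.le_floordiv_iff_mul_le hb).mpr (by omega)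
  have hself : PySem.Int.floordiv n b * b ≤ n :=
    (PySem.Int.le_floordiv_iff_mul_le hb).mp le_rfl
  have ht0 : 0 < PySem.Int.floordiv n b := by omega
  refine ⟨ht, ?_, ?_⟩
  · exact (PySem.Int.le_floordiv_iff_mul_le ht0).mpr (by nlinarith)
  · have := (PySem.Int.floordiv_lt_iff_lt_mul (a := n) (q := n + 1) ht0).mpr
      (by nlinarith)
    omega

theorem fdiv_const (n b j : Int) (hb : 0 < b) (hbn : b ≤ n) (hj : b ≤ j)
    (hjr : j ≤ PySem.Int.floordiv n (PySem.Int.floordiv n b)) :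
    PySem.Int.floordiv n j = PySem.Int.floordiv n b := by
  obtain ⟨ht, _, _⟩ := fdiv_facts n b hb hbn
  have ht0 : 0 < PySem.Int.floordiv n b := by omega
  have hj0 : 0 < j := by omega
  have hjself : PySem.Int.floordiv n j * j ≤ n :=
    (PySem.Int.le_floordiv_iff_mul_le hj0).mp le_rfl
  have hrself : PySem.Int.floordiv n (PySem.Int.floordiv n b) * PySem.Int.floordiv n b ≤ n :=
    (PySem.Int.le_floordiv_iff_mul_le ht0).mp le_rfl
  have hjnn : 0 ≤ PySem.Int.floordiv n j :=
    (PySem.Int.le_floordiv_iff_mul_le hj0).mpr (by omega)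
  have h1 : PySem.Int.floordiv n j ≤ PySem.Int.floordiv n b :=
    (PySem.Int.le_floordiv_iff_mul_le hb).mpr (by nlinarith)
  have h2 : PySem.Int.floordiv n b ≤ PySem.Int.floordiv n j :=
    (PySem.Int.le_floordiv_iff_mul_le hj0).mpr (by nlinarith)
  omega

-- the summand is linear in j on a divisor block
theorem gFC_linear (n b j : Int) (hb : 0 < b) (hbn : b ≤ n) (hj : b ≤ j)
    (hjr : j ≤ PySem.Int.floordiv n (PySem.Int.floordiv n b)) :
    gFC n j = (PySem.Int.floordiv n b + 2 * PySem.Int.floordiv n b * n)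
      - PySem.Int.floordiv n b * (PySem.Int.floordiv n b + 1) * j := by
  have hdj := fdiv_const n b j hb hbn hj hjr
  have hmj : PySem.Int.floordiv n j * j + PySem.Int.mod n j = n :=
    PySem.Int.floordiv_mul_add_mod n j
  unfold gFC
  rw [hdj] at *
  have hm : PySem.Int.mod n j = n - PySem.Int.floordiv n b * j := by linarith
  rw [hdj, hm]; ring

-- closed form of one block, exactly as Source B computes it
theorem block_sum (n b : Int) (hb : 0 < b) (hbn : b ≤ n) :
    ISum (gFC n) b (PySem.Int.floordiv n (PySem.Int.floordiv n b))
      = (PySem.Int.floordiv n (PySem.Int.floordiv n b) - b + 1)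
          * (PySem.Int.floordiv n b + 2 * PySem.Int.floordiv n b * n)
        - PySem.Int.floordiv n b * (PySem.Int.floordiv n b + 1)
          * PySem.Int.floordiv
              ((b + PySem.Int.floordiv n (PySem.Int.floordiv n b))
                * (PySem.Int.floordiv n (PySem.Int.floordiv n b) - b + 1)) 2 := by
  obtain ⟨ht, hbr, hrn⟩ := fdiv_facts n b hb hbn
  set t := PySem.Int.floordiv n b with htdef
  set r := PySem.Int.floordiv n t with hrdef
  have hcongr : ISum (gFC n) b r
      = ISum (fun j => (t + 2 * t * n) - t * (t + 1) * j) b r :=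
    ISum_congr _ _ b r (fun j h1 h2 => gFC_linear n b j hb hbn h1 h2)
  have hgauss := ISum_gauss b r (by omega)
  have hdiv2 : PySem.Int.floordiv ((b + r) * (r - b + 1)) 2
      = ISum (fun j => j) b r := by
    have h2 : (b + r) * (r - b + 1) = ISum (fun j => j) b r * 2 := by
      linear_combination -hgauss
    rw [h2, PySem.Int.floordiv_eq_ediv_of_pos (by omega)]
    exact Int.mul_ediv_cancel _ (by omega)
  rw [hcongr, ISum_linear _ _ b r (by omega), hdiv2]
  ring

-- the B-side loop computes the tail sum of A's summand
theorem fcsLoop_eq (n : Int) (fuel : Nat) (b res : Int) (hb : 1 ≤ b)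
    (hf : (n + 1 - b).toNat ≤ fuel) :
    fcsLoop n fuel b res = res + ISum (gFC n) b n := by
  induction fuel generalizing b res with
  | zero =>
    have hnb : n < b := by omega
    rw [fcsLoop, ISum_nil _ _ _ hnb]
    ring
  | succ fuel ih =>
    rw [fcsLoop]
    by_cases h : b ≤ n
    · rw [if_pos h]
      obtain ⟨ht, hbr, hrn⟩ := fdiv_facts n b (by omega) h
      rw [ih (PySem.Int.floordiv n (PySem.Int.floordiv n b) + 1) _ (by omega) (by omega)]
      rw [ISum_split (gFC n) b (PySem.Int.floordiv n (PySem.Int.floordiv n b)) n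
        (by omega) hrn]
      rw [block_sum n b (by omega) h]
      ring
    · rw [if_neg h, ISum_nil _ _ _ (by omega)]
      ring

-- A's second-loop body, reassociated into 'acc + (term)' form
theorem foldA2_fun (n : Int) :
    (fun (res b : Int) =>
      let t := PySem.Int.floordiv n b
      let res := res + b * t * (t - 1)
      res + 2 * t * PySem.Int.mod n b)
    = (fun (acc j : Int) => acc
        + (j * PySem.Int.floordiv n j * (PySem.Int.floordiv n j - 1)
            + 2 * PySem.Int.floordiv n j * PySem.Int.mod n j)) := by
  funext acc j
  simp only []
  ring

-- ===== VERDICT (by name: the statement is the Claim_ definition above) =====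
theorem calculateFloorCeilSum_spec : Claim_equal_calculateFloorCeilSum := by
  intro n _
  unfold Spec_calculateFloorCeilSum calculateFloorCeilSum calculateFloorCeilSum_alt
  simp only []
  rw [foldA2_fun n, foldl_pyRange_add, foldl_pyRange_add,
    fcsLoop_eq n n.toNat 1 (n * n) le_rfl (by omega)]
  have : ISum (gFC n) 1 n
      = ISum (fun j => PySem.Int.floordiv n j) 1 n
        + ISum (fun j => j * PySem.Int.floordiv n j * (PySem.Int.floordiv n j - 1)
            + 2 * PySem.Int.floordiv n j * PySem.Int.mod n j) 1 n := by
    rw [← ISum_add]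
    exact ISum_congr _ _ 1 n (fun j _ _ => rfl)
  rw [this]
  ring
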